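-- pv_equiv track=rewrite | github.com/Mitchell-F-Newell/CPSC_526 | Assignment_4/CPSC_526_Assignment4.py | findMaxFailedlogins
-- ===== SOURCE A (Python) =====
-- def findMaxFailedlogins(data):
--     max = 0
--     count = 0
--     for i in data:
--         if i['eventid'] == 'cowrie.login.failed':
--             count = count + 1
--             if count >= max:
--                 max = count
--         if i['eventid'] == 'cowrie.login.success':
--             count = 0
--     return max
-- ===== SOURCE B (Python) =====
-- def findMaxFailedlogins(data):
--     # Collect the length of every run of consecutive failed logins (most recent
--     # run first, runs delimited by successful logins), then take the maximum.
--     runs = [0]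
--     for d in data:
--         e = d['eventid']
--         if e == 'cowrie.login.success':
--             runs.insert(0, 0)
--         elif e == 'cowrie.login.failed':
--             runs[0] += 1
--     return max(runs)
-- ===== Notes on version B (the rewrite author's own statement) =====
-- stated objective: alternative
-- what changed: B accumulates the list of all consecutive-failed-run lengths (delimited by successes, other events transparent) and takes max of that list afterwards, instead of A's interleaved running-count/running-max state machine.
import Mathlib
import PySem

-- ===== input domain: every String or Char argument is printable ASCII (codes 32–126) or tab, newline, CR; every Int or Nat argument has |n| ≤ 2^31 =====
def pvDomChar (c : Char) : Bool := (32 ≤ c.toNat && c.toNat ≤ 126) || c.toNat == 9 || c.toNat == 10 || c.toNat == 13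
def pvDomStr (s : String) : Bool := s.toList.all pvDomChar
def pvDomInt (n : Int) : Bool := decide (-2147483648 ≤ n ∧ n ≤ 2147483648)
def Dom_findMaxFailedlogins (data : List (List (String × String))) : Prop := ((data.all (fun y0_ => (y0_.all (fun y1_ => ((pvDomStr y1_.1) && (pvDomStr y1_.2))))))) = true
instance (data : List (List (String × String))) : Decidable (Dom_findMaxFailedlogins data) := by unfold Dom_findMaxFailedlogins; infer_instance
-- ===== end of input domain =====

-- B replaces A's interleaved running-count/running-max state with a fold that collects
-- every consecutive-failed-run length into a list and takes its maximum afterwards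
-- (alternative decomposition, same O(n) cost).


-- ===== PORT A =====
-- i['eventid']: first-match lookup; Pre_ guarantees the key is present, so the
-- .getD "" default is never reached on admitted inputs (Python raises KeyError there).
def pvEvent (i : List (String × String)) : String :=
  ((PySem.Dict.mk i).get? "eventid").getD ""

def pvStepA (st : Int × Int) (i : List (String × String)) : Int × Int :=
  let e := pvEvent i
  let st := if e = "cowrie.login.failed" then
              let c := st.2 + 1
              (if c ≥ st.1 then c else st.1, c)
            else st
  if e = "cowrie.login.success" then (st.1, 0) else st

def findMaxFailedlogins (data : List (List (String × String))) : Int :=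
  (data.foldl pvStepA (0, 0)).1

-- ===== PORT B =====
def pvStepB (runs : List Int) (i : List (String × String)) : List Int :=
  let e := pvEvent i
  if e = "cowrie.login.success" then 0 :: runs
  else if e = "cowrie.login.failed" then
    match runs with
    | [] => []            -- unreachable: runs starts nonempty and never shrinks
    | r :: t => (r + 1) :: t
  else runs

def findMaxFailedlogins_alt (data : List (List (String × String))) : Int :=
  let runs := data.foldl pvStepB [0]
  (PySem.List.max? runs (fun x => x)).getD 0   -- max(runs); runs is never empty

-- ===== PRECONDITION & SPEC =====
-- Pre_ excludes exactly the inputs where some event dict lacks the key 'eventid',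
-- on which the Python A raises KeyError.
def Pre_findMaxFailedlogins (data : List (List (String × String))) : Prop :=
  ∀ i ∈ data, (PySem.Dict.mk i).contains "eventid" = true
instance (data : List (List (String × String))) : Decidable (Pre_findMaxFailedlogins data) := by unfold Pre_findMaxFailedlogins; infer_instance
def pvWitness_findMaxFailedlogins : (List (List (String × String))) :=
  [[("eventid", "cowrie.login.failed")], [("eventid", "cowrie.login.success")]]

def Spec_findMaxFailedlogins (data : List (List (String × String))) (out : Int) : Prop := out = findMaxFailedlogins_alt data
instance (data : List (List (String × String))) (out : Int) : Decidable (Spec_findMaxFailedlogins data out) := by unfold Spec_findMaxFailedlogins; infer_instance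

-- ===== CLAIM (what is proved, stated in full; the proofs are below) =====
def Claim_equal_findMaxFailedlogins : Prop := ∀ (data : List (List (String × String))), Dom_findMaxFailedlogins data → Pre_findMaxFailedlogins data → Spec_findMaxFailedlogins data (findMaxFailedlogins data)

-- ===== LEMMAS AND PROOFS =====

-- folding max over a list distributes over a max in the seed
lemma pvFoldlMaxPair (t : List Int) (a : Int) : ∀ b, t.foldl max (max a b) = max a (t.foldl max b) := by
  induction t with
  | nil => intro b; simp [List.foldl]
  | cons x t ih =>
    intro b
    simp only [List.foldl]
    rw [max_assoc, ih]

lemma pvZeroLeFoldl (t : List Int) : 0 ≤ t.foldl max 0 :=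
  (PySem.List.le_foldl_max t 0).1

-- loop invariant: A's running max m equals max of the current count c and all
-- collected run lengths t, provided 0 ≤ c.
lemma pvKey (data : List (List (String × String))) :
    ∀ (m c : Int) (t : List Int), 0 ≤ c → m = max c (t.foldl max 0) →
    (data.foldl pvStepA (m, c)).1
      = (PySem.List.max? (data.foldl pvStepB (c :: t)) (fun x => x)).getD 0 := by
  induction data with
  | nil =>
    intro m c t hc hm
    simp only [List.foldl, PySem.List.max?_id_cons, Option.getD_some]
    have := pvFoldlMaxPair t c 0
    rw [max_comm c 0] at this
    have hc0 : max 0 c = c := by omega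
    rw [hc0] at this
    omega
  | cons i data ih =>
    intro m c t hc hm
    simp only [List.foldl, pvStepA, pvStepB]
    by_cases hf : pvEvent i = "cowrie.login.failed"
    · have hs : ¬ pvEvent i = "cowrie.login.success" := by
        rw [hf]; decide
      rw [if_pos hf, if_pos hf, if_neg hs, if_neg hs]
      exact ih (if c + 1 ≥ m then c + 1 else m) (c + 1) t (by omega) (by omega)
    · by_cases hs : pvEvent i = "cowrie.login.success"
      · rw [if_neg hf, if_neg hf, if_pos hs, if_pos hs]
        have hX := pvZeroLeFoldl t
        have h2 : (c :: t).foldl max 0 = max 0 (t.foldl max c) := by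
          simp only [List.foldl]
          have := pvFoldlMaxPair t 0 c
          rw [this]
        have h3 : t.foldl max c = max c (t.foldl max 0) := by
          have := pvFoldlMaxPair t c 0
          have hc0 : max c 0 = c := by omega
          rw [hc0] at this
          exact this
        exact ih m 0 (c :: t) le_rfl (by rw [h2, h3]; omega)
      · simp only [if_neg hf, if_neg hs]
        exact ih m c t hc hm

-- ===== VERDICT (by name: the statement is the Claim_ definition above) =====
theorem findMaxFailedlogins_spec : Claim_equal_findMaxFailedlogins := by
  intro data _ _
  unfold Spec_findMaxFailedlogins findMaxFailedlogins findMaxFailedlogins_alt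
  exact pvKey data 0 0 [] le_rfl (by simp)
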